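-- pv_equiv track=rewrite | github.com/sjtu-xai-lab/generalizable-interaction | utils/plot_by_order.py | is_in_marginal
-- ===== SOURCE A (Python) =====
-- def is_in_marginal(pattern, pattern_1):
--     '''
--     pattern's length >= 5: more than 5 True in pattern
--     is in marginal, with marginal distance = 1
--     pattern is:  [False  True  True  True False  True  True  True  True  True]
--     pattern_1 is:  [False  True  True  True False  True  True  True  True False]
--     function: judge whether pattern and pattern_1 are marginally 'same' ,
--         if pattern 1 and pattern_1 only differs in one element,
--             here element refers to the index of pattern or pattern_1 where is 'True', 'False' should be ignored
--         then pattern and pattern_1 are marginally 'same'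
--     '''
--     count_diff = 0
--     for i in range(len(pattern)):
--         if pattern[i] and pattern_1[i]:
--             continue
--         elif pattern[i] or pattern_1[i]:
--             count_diff += 1
--         if count_diff > 1:
--             return False
--     return True
-- ===== SOURCE B (Python) =====
-- def is_in_marginal(pattern, pattern_1):
--     n = min(len(pattern), len(pattern_1))
--     s1 = {i for i in range(n) if pattern[i]}
--     s2 = {i for i in range(n) if pattern_1[i]}
--     return len(s1 ^ s2) <= 1
-- ===== Notes on version B (the rewrite author's own statement) =====
-- stated objective: simpler
-- what changed: Replaces the stateful counting loop with early exit by building the two sets of truthy indices of the common prefix and testing whether their symmetric difference has at most one element.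
import Mathlib
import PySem

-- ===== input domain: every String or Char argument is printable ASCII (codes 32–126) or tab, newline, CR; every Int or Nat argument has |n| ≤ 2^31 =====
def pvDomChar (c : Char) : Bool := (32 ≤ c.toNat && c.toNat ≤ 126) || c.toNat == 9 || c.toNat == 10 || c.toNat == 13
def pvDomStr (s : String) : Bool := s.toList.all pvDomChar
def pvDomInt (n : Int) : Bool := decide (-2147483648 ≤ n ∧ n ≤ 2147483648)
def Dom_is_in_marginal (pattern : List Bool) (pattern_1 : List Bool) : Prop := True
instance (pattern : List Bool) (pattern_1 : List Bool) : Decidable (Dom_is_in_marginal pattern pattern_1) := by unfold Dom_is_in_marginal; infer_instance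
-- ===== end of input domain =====

-- B replaces A's stateful counting loop (with early exit) by comparing the two sets of
-- truthy indices of the common prefix via their symmetric difference; objective: simpler.

-- ===== PORT A =====
-- the for-loop of A: state is count_diff; early return False when count_diff > 1
def isInMarginalLoop (pattern : List Bool) (pattern_1 : List Bool) : List Int → Int → Bool
  | [], _ => true
  | i :: rest, count =>
    if PySem.List.pyGetD pattern i false && PySem.List.pyGetD pattern_1 i false then
      isInMarginalLoop pattern pattern_1 rest count
    else
      let count' := if PySem.List.pyGetD pattern i false || PySem.List.pyGetD pattern_1 i false then count + 1 else count
      if count' > 1 then false else isInMarginalLoop pattern pattern_1 rest count'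

def is_in_marginal (pattern : List Bool) (pattern_1 : List Bool) : Bool :=
  isInMarginalLoop pattern pattern_1 (PySem.List.pyRange 0 (pattern.length : Int) 1) 0

-- ===== PORT B =====
def is_in_marginal_alt (pattern : List Bool) (pattern_1 : List Bool) : Bool :=
  let n : Int := min (pattern.length : Int) (pattern_1.length : Int)
  let s1 : PySem.Set Int := PySem.Set.ofList ((PySem.List.pyRange 0 n 1).filter (fun i => PySem.List.pyGetD pattern i false))
  let s2 : PySem.Set Int := PySem.Set.ofList ((PySem.List.pyRange 0 n 1).filter (fun i => PySem.List.pyGetD pattern_1 i false))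
  decide (PySem.Set.len (PySem.Set.symmDiff s1 s2) ≤ 1)

-- ===== PRECONDITION & SPEC =====
-- A indexes pattern_1 at every index of pattern, so when pattern_1 is shorter it raises
-- IndexError — unless at least two mismatches occur among the in-range indices, in which
-- case the early 'return False' fires first; Pre_ admits exactly the inputs where A returns.
def Pre_is_in_marginal (pattern : List Bool) (pattern_1 : List Bool) : Prop :=
  pattern.length ≤ pattern_1.length ∨
    2 ≤ (PySem.List.pyRange 0 (pattern_1.length : Int) 1).countP
          (fun i => PySem.List.pyGetD pattern i false != PySem.List.pyGetD pattern_1 i false)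
instance (pattern : List Bool) (pattern_1 : List Bool) : Decidable (Pre_is_in_marginal pattern pattern_1) := by unfold Pre_is_in_marginal; infer_instance
def pvWitness_is_in_marginal : List Bool × List Bool := ([true, false, true], [true, true, true])

def Spec_is_in_marginal (pattern : List Bool) (pattern_1 : List Bool) (out : Bool) : Prop := out = is_in_marginal_alt pattern pattern_1
instance (pattern : List Bool) (pattern_1 : List Bool) (out : Bool) : Decidable (Spec_is_in_marginal pattern pattern_1 out) := by unfold Spec_is_in_marginal; infer_instance

-- ===== CLAIM (what is proved, stated in full; the proofs are below) =====
def Claim_equal_is_in_marginal : Prop := ∀ (pattern : List Bool) (pattern_1 : List Bool), Dom_is_in_marginal pattern pattern_1 → Pre_is_in_marginal pattern pattern_1 → Spec_is_in_marginal pattern pattern_1 (is_in_marginal pattern pattern_1)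

-- ===== LEMMAS AND PROOFS =====

-- A's loop equals "total mismatch count stays ≤ 1"
theorem loop_eq_countP (pattern pattern_1 : List Bool) (l : List Int) (c : Int)
    (h0 : 0 ≤ c) (h1 : c ≤ 1) :
    isInMarginalLoop pattern pattern_1 l c =
      decide (c + (l.countP (fun i => PySem.List.pyGetD pattern i false != PySem.List.pyGetD pattern_1 i false) : Int) ≤ 1) := by
  induction l generalizing c with
  | nil => simp [isInMarginalLoop]; omega
  | cons i rest ih =>
    simp only [isInMarginalLoop, List.countP_cons]
    cases hp : PySem.List.pyGetD pattern i false <;> cases hq : PySem.List.pyGetD pattern_1 i false <;>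
      simp [hp, hq]
    · simp only [decide_eq_false (by omega : ¬ (1 < c)), Bool.not_false, Bool.true_and]
      exact ih c h0 h1
    · by_cases hc : 0 < c
      · simp only [decide_eq_true hc, Bool.not_true, Bool.false_and]
        symm; rw [decide_eq_false_iff_not]; push_cast; omega
      · simp only [decide_eq_false hc, Bool.not_false, Bool.true_and]
        rw [ih (c+1) (by omega) (by omega)]; simp only [decide_eq_decide]; push_cast; omega
    · by_cases hc : 0 < c
      · simp only [decide_eq_true hc, Bool.not_true, Bool.false_and]
        symm; rw [decide_eq_false_iff_not]; push_cast; omega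
      · simp only [decide_eq_false hc, Bool.not_false, Bool.true_and]
        rw [ih (c+1) (by omega) (by omega)]; simp only [decide_eq_decide]; push_cast; omega
    · exact ih c h0 h1

theorem countP_xor_split (p q : Int → Bool) (l : List Int) :
    l.countP (fun i => p i && !q i) + l.countP (fun i => q i && !p i) =
      l.countP (fun i => p i != q i) := by
  induction l with
  | nil => rfl
  | cons i rest ih =>
    simp only [List.countP_cons]
    cases hp : p i <;> cases hq : q i <;> simp <;> omega

-- over any duplicate-free index list, |{i | p i} ^ {i | q i}| = number of i with p i ≠ q i
theorem symmDiff_len_eq_countP (p q : Int → Bool) (r : List Int) (hnd : r.Nodup) :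
    PySem.Set.len (PySem.Set.symmDiff (PySem.Set.ofList (r.filter p)) (PySem.Set.ofList (r.filter q)))
      = r.countP (fun i => p i != q i) := by
  have hs1 : PySem.Set.ofList (r.filter p) = r.filter p :=
    PySem.Set.ofList_eq_self_of_nodup (xs := r.filter p) (hnd.filter p)
  have hs2 : PySem.Set.ofList (r.filter q) = r.filter q :=
    PySem.Set.ofList_eq_self_of_nodup (xs := r.filter q) (hnd.filter q)
  rw [hs1, hs2]
  have hdiff : ∀ (f g : Int → Bool),
      PySem.Set.diff (r.filter f) (r.filter g) = r.filter (fun i => f i && !g i) := by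
    intro f g
    show (r.filter f).filter (fun x => !(PySem.Set.contains (r.filter g) x)) = _
    rw [List.filter_filter]
    refine List.filter_congr ?_
    intro x hxr
    have hc : PySem.Set.contains (r.filter g) x = g x := by
      cases hg : g x
      · have hnm : x ∉ r.filter g := by
          intro hmem
          rw [List.mem_filter] at hmem
          rw [hmem.2] at hg; exact Bool.false_ne_true hg.symm
        cases hcc : PySem.Set.contains (r.filter g) x
        · rfl
        · exact absurd ((PySem.Set.contains_iff _ _).mp hcc) hnm
      · exact (PySem.Set.contains_iff _ _).mpr (List.mem_filter.mpr ⟨hxr, hg⟩)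
    rw [hc, Bool.and_comm]
  simp only [PySem.Set.symmDiff, PySem.Set.len]
  rw [List.length_append, hdiff p q, hdiff q p, ← List.countP_eq_length_filter,
    ← List.countP_eq_length_filter, countP_xor_split p q r]

-- ===== VERDICT (by name: the statement is the Claim_ definition above) =====
theorem is_in_marginal_spec : Claim_equal_is_in_marginal := by
  intro pattern pattern_1 _ hpre
  unfold Spec_is_in_marginal is_in_marginal is_in_marginal_alt
  dsimp only
  rw [loop_eq_countP pattern pattern_1 (PySem.List.pyRange 0 (pattern.length : Int) 1) 0 le_rfl (by norm_num)]
  rw [symmDiff_len_eq_countP (fun i => PySem.List.pyGetD pattern i false)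
    (fun i => PySem.List.pyGetD pattern_1 i false) _
    (PySem.List.nodup_pyRange_one _ _)]
  by_cases hle : pattern.length ≤ pattern_1.length
  · rw [show min ((pattern.length : Int)) ((pattern_1.length : Int)) = (pattern.length : Int) from by omega]
    rw [decide_eq_decide]
    omega
  · rcases hpre with h | h2
    · omega
    · rw [show min ((pattern.length : Int)) ((pattern_1.length : Int)) = (pattern_1.length : Int) from by omega]
      rw [PySem.List.pyRange_one_append 0 (pattern_1.length : Int) (pattern.length : Int)
          (by positivity) (by omega),
        List.countP_append]
      rw [decide_eq_decide]
      push_cast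
      omega
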